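-- pv_equiv track=rewrite | github.com/RaziurC4S5E/Tic-Tac-Toe_futurecoder | main.py | each_column_check
-- ===== SOURCE A (Python) =====
-- def each_column_check(column): #function to check each column and return True if every value of the column matches or return False if it doesnt
--     result = False
--     for index in range(len(column)-1):
--         if column[index] == '' or column[index] == " ":
--             return False
--         else:
--             if column[index] == column[index+1]:
--                 result = True
--             else:
--                 return False
--     return result
-- ===== SOURCE B (Python) =====
-- def each_column_check(column):
--     s = set(column)
--     return len(column) > 1 and len(s) == 1 and column[0] not in ('', ' ')
-- ===== Notes on version B (the rewrite author's own statement) =====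
-- stated objective: simpler
-- what changed: Replaces A's adjacent-pair scan with early returns by a one-shot distinct-value collapse (set) plus a length test and a single emptiness test on the shared value.
import Mathlib
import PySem

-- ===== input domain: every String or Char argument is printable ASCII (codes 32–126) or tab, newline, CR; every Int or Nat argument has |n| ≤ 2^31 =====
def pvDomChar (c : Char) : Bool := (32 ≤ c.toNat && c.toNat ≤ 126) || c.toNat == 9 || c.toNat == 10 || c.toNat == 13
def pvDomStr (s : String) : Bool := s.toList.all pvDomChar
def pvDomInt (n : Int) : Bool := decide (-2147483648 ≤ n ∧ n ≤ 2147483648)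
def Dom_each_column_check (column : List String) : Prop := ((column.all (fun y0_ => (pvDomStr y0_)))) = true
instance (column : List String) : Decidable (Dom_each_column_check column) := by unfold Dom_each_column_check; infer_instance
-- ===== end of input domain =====

-- B replaces A's adjacent-pair scan by a set collapse + length/emptiness tests (objective: simpler).

-- ===== PORT A =====
-- A's loop over range(len-1) comparing column[index] with column[index+1], with early
-- returns, transcribed as structural recursion over the adjacent pairs; 'result' is the
-- loop's accumulator.
def eccGo : List String → Bool → Bool
  | a :: b :: t, _ =>
    if a = "" ∨ a = " " then false
    else if a = b then eccGo (b :: t) true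
    else false
  | _, result => result

def each_column_check (column : List String) : Bool :=
  eccGo column false

-- ===== PORT B =====
def each_column_check_alt (column : List String) : Bool :=
  let s := PySem.Set.ofList column
  decide (1 < column.length) && decide (s.length = 1)
    && !(column.headD "" == "" || column.headD "" == " ")

-- ===== PRECONDITION & SPEC =====
def Spec_each_column_check (column : List String) (out : Bool) : Prop := out = each_column_check_alt column
instance (column : List String) (out : Bool) : Decidable (Spec_each_column_check column out) := by unfold Spec_each_column_check; infer_instance

-- ===== CLAIM (what is proved, stated in full; the proofs are below) =====
def Claim_equal_each_column_check : Prop := ∀ (column : List String), Dom_each_column_check column → Spec_each_column_check column (each_column_check column)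

-- ===== LEMMAS AND PROOFS =====

-- set(a::l) is a singleton iff every element of l equals a
lemma foldl_add_all_eq (a : String) (l : List String) (h : ∀ x ∈ l, x = a) :
    l.foldl PySem.Set.add [a] = [a] := by
  induction l with
  | nil => rfl
  | cons x t ih =>
    have hx : x = a := h x (by simp)
    subst hx
    have : PySem.Set.add [x] x = [x] := by
      simp [PySem.Set.add, PySem.Set.contains]
    simp only [List.foldl_cons, this]
    exact ih (fun y hy => h y (by simp [hy]))

lemma set_len_one_iff (a : String) (l : List String) :
    (PySem.Set.ofList (a :: l)).length = 1 ↔ ∀ x ∈ l, x = a := by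
  constructor
  · intro h x hx
    obtain ⟨c, hc⟩ := List.length_eq_one_iff.mp h
    have ha : a ∈ PySem.Set.ofList (a :: l) := by
      rw [PySem.Set.mem_ofList]; simp
    have hxm : x ∈ PySem.Set.ofList (a :: l) := by
      rw [PySem.Set.mem_ofList]; simp [hx]
    rw [hc] at ha hxm
    simp at ha hxm
    rw [hxm, ha]
  · intro h
    have : PySem.Set.ofList (a :: l) = [a] := by
      rw [PySem.Set.ofList_eq_foldl]
      simp only [List.foldl_cons]
      have : PySem.Set.add [] a = [a] := by rfl
      rw [this]
      exact foldl_add_all_eq a l h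
    rw [this]
    rfl

lemma eccGo_true (a b : String) (t : List String) :
    eccGo (a :: b :: t) true
      = (decide (b = a ∧ ∀ x ∈ t, x = a) && !(a == "" || a == " ")) := by
  induction t generalizing a b with
  | nil =>
    by_cases he : a = "" ∨ a = " "
    · simp [eccGo, he]
      rcases he with h | h <;> simp [h]
    · push Not at he
      by_cases hab : a = b
      · subst hab
        simp [eccGo, he.1, he.2, beq_iff_eq]
      · simp [eccGo, he.1, he.2, hab, Ne.symm hab]
  | cons c t' ih =>
    by_cases he : a = "" ∨ a = " "
    · simp [eccGo, he]
      rcases he with h | h <;> simp [h]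
    · push Not at he
      by_cases hab : a = b
      · subst hab
        have hstep : eccGo (a :: a :: c :: t') true = eccGo (a :: c :: t') true := by
          simp [eccGo, he.1, he.2]
        rw [hstep, ih a c]
        simp [he.1, he.2]
      · simp [eccGo, he.1, he.2, hab, Ne.symm hab]

-- ===== VERDICT (by name: the statement is the Claim_ definition above) =====
theorem each_column_check_spec : Claim_equal_each_column_check := by
  intro column _
  unfold Spec_each_column_check each_column_check each_column_check_alt
  match column with
  | [] => rfl
  | [a] =>
    simp [eccGo, PySem.Set.ofList]
  | a :: b :: t =>
    have h1 : eccGo (a :: b :: t) false = eccGo (a :: b :: t) true := rfl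
    rw [h1, eccGo_true]
    have h2 : (PySem.Set.ofList (a :: b :: t)).length = 1 ↔ ∀ x ∈ b :: t, x = a :=
      set_len_one_iff a (b :: t)
    simp only [List.headD_cons, List.length_cons]
    by_cases hs : (PySem.Set.ofList (a :: b :: t)).length = 1
    · have hall := h2.mp hs
      have hb : b = a := hall b (by simp)
      have ht : ∀ x ∈ t, x = a := fun x hx => hall x (by simp [hx])
      have hall' : (b = a ∧ ∀ x ∈ t, x = a) := ⟨hb, ht⟩
      simp [hall']
      simp [set_len_one_iff a (a :: t), ht]
    · have hnall : ¬ (b = a ∧ ∀ x ∈ t, x = a) := by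
        intro ⟨hb, ht⟩
        exact hs (h2.mpr (by
          intro x hx
          rcases List.mem_cons.mp hx with h | h
          · rw [h]; exact hb
          · exact ht x h))
      simp [hs, hnall]
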